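-- pv_equiv track=rewrite | github.com/utmittal/nyt-spelling-bee-solver | SpellingBeeSolver.py | _preprocess_get_bit_to_word_dict
-- ===== SOURCE A (Python) =====
-- import string
--
-- def _preprocess_get_bit_to_word_dict(dictionary: list[str]) -> dict[int: [str]]:
--     """
--     Generates a dictionary where the keys are the bit representation of the word (as an integer) and the values are
--     a list of corresponding words. Bit representations ignore letter ordering and letter duplicates. So a single bit
--     representation may have multiple corresponding words.
--
--     :param dictionary: list of words
--     :return: dict of bit representation to list of words
--     """
--     bit_dict = {}
--     for word in dictionary:
--         word_bits = ['0'] * 26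
--         letters = set(word)
--         for c in letters:
--             word_bits[string.ascii_lowercase.index(c)] = '1'
--         word_bits = int(''.join(word_bits), 2)
--
--         # anagrams and words with repeated letters will have the same bit representation
--         if word_bits in bit_dict:
--             bit_dict[word_bits].append(word)
--         else:
--             bit_dict[word_bits] = [word]
--
--     return bit_dict
-- ===== SOURCE B (Python) =====
-- import string
--
--
-- def _word_mask(word):
--     return sum({1 << (25 - string.ascii_lowercase.index(c)) for c in set(word)})
--
--
-- def _preprocess_get_bit_to_word_dict(dictionary: list[str]) -> dict[int: [str]]:
--     masks = [_word_mask(w) for w in dictionary]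
--     return {m: [w for w, mm in zip(dictionary, masks) if mm == m]
--             for m in dict.fromkeys(masks)}
-- ===== Notes on version B (the rewrite author's own statement) =====
-- stated objective: alternative
-- what changed: Masks are computed once as an arithmetic sum of per-letter bit values (instead of building a 26-char '0'/'1' string and parsing it base 2), and the grouping dict is built by deduplicating the mask list with dict.fromkeys and collecting each group with a zip-filter comprehension, instead of incrementally appending into hash buckets.
import Mathlib
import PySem

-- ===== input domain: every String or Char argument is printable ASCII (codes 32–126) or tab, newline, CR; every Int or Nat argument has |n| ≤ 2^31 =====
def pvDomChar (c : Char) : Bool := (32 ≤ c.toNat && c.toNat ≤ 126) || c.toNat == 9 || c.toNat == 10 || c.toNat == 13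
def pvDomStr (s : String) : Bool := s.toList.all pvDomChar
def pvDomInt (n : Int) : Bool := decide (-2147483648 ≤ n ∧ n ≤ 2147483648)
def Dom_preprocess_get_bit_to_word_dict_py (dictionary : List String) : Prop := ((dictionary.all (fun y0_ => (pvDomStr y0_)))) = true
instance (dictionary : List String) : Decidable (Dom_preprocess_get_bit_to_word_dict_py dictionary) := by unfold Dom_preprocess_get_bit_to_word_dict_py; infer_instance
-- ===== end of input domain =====

-- B computes each word's bitmask as an arithmetic sum of per-letter bit values and groups
-- words by deduplicating the mask list and collecting each group with a zip-filter pass,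
-- instead of A's string-build-and-parse mask and incremental hash-bucket appends (objective: alternative).


-- ===== PORT A =====
def asciiLowerChars : List Char :=
  ['a','b','c','d','e','f','g','h','i','j','k','l','m',
   'n','o','p','q','r','s','t','u','v','w','x','y','z']

-- hand port of int(s, 2): exact for nonempty strings of '0'/'1' digits
-- (no sign/whitespace/underscores), which are the only arguments A ever passes to it
def intBase2 (cs : List Char) : Int :=
  cs.foldl (fun a c => a * 2 + (if c = '1' then 1 else 0)) 0

def wordBitsA (word : String) : Int :=
  let letters : PySem.Set Char := PySem.Set.ofList word.toList
  let marks := letters.foldl (fun (bs : List Char) c =>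
      match PySem.List.index? asciiLowerChars c with
      | some i => bs.set i '1'
      | none => bs) (List.replicate 26 '0')   -- none = ValueError in Python; excluded by Pre_
  intBase2 marks

def preprocess_get_bit_to_word_dict_py (dictionary : List String) : List (Int × List String) :=
  (dictionary.foldl (fun (bd : PySem.Dict Int (List String)) word =>
      let wb := wordBitsA word
      match bd.get? wb with
      | some l => bd.insert wb (l ++ [word])
      | none   => bd.insert wb [word]) PySem.Dict.empty).items

-- ===== PORT B =====
def wordMaskB (word : String) : Int :=
  List.sum (PySem.Set.ofList ((PySem.Set.ofList word.toList).filterMap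
      (fun c => (PySem.List.index? asciiLowerChars c).map
        (fun i : Nat => (1 : Int) <<< (25 - i)))))   -- none = ValueError in Python; excluded by Pre_

def preprocess_get_bit_to_word_dict_py_alt (dictionary : List String) : List (Int × List String) :=
  let masks := dictionary.map wordMaskB
  (PySem.List.dedup masks).map (fun m =>
    (m, ((dictionary.zip masks).filter (fun p => p.2 == m)).map (fun p => p.1)))

-- ===== PRECONDITION & SPEC =====
-- Pre_ excludes dictionaries containing a word with any character outside 'a'..'z':
-- on those A raises ValueError (string.ascii_lowercase.index), so A returns exactly on Pre_.
def Pre_preprocess_get_bit_to_word_dict_py (dictionary : List String) : Prop :=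
  (dictionary.all (fun w => w.toList.all (fun c => 'a' ≤ c && c ≤ 'z'))) = true
instance (dictionary : List String) : Decidable (Pre_preprocess_get_bit_to_word_dict_py dictionary) := by
  unfold Pre_preprocess_get_bit_to_word_dict_py; infer_instance

def pvWitness_preprocess_get_bit_to_word_dict_py : List String := ["abc", "cab", "bee"]

def Spec_preprocess_get_bit_to_word_dict_py (dictionary : List String) (out : List (Int × List String)) : Prop := out = preprocess_get_bit_to_word_dict_py_alt dictionary
instance (dictionary : List String) (out : List (Int × List String)) : Decidable (Spec_preprocess_get_bit_to_word_dict_py dictionary out) := by unfold Spec_preprocess_get_bit_to_word_dict_py; infer_instance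

-- ===== CLAIM (what is proved, stated in full; the proofs are below) =====
def Claim_equal_preprocess_get_bit_to_word_dict_py : Prop := ∀ (dictionary : List String), Dom_preprocess_get_bit_to_word_dict_py dictionary → Pre_preprocess_get_bit_to_word_dict_py dictionary → Spec_preprocess_get_bit_to_word_dict_py dictionary (preprocess_get_bit_to_word_dict_py dictionary)

-- ===== LEMMAS AND PROOFS =====

def idxc (c : Char) : Nat := (PySem.List.index? asciiLowerChars c).getD 0

lemma mem_ascii {c : Char} (h1 : 'a' ≤ c) (h2 : c ≤ 'z') : c ∈ asciiLowerChars := by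
  have hrange : asciiLowerChars = (List.range' 97 26).map Char.ofNat := by decide
  have h1' : 97 ≤ c.toNat := Fin.mk_le_mk.mp h1
  have h2' : c.toNat ≤ 122 := Fin.mk_le_mk.mp h2
  rw [hrange]
  refine List.mem_map.mpr ⟨c.toNat, ?_, Char.ofNat_toNat c⟩
  exact List.mem_range'.mpr ⟨c.toNat - 97, by omega, by omega⟩

lemma index?_eq_idxc {c : Char} (hc : c ∈ asciiLowerChars) :
    PySem.List.index? asciiLowerChars c = some (idxc c) := by
  rcases (PySem.List.index?_isSome_iff (xs := asciiLowerChars) (v := c)).mpr hc with h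
  rcases Option.isSome_iff_exists.mp h with ⟨i, hi⟩
  simp only [idxc, hi, Option.getD_some]

lemma idxc_lt {c : Char} (hc : c ∈ asciiLowerChars) : idxc c < 26 := by
  have h := index?_eq_idxc hc
  rcases PySem.List.getElem_of_index?_eq_some h with ⟨hk, -⟩
  simpa [asciiLowerChars] using hk

lemma idxc_inj {c c' : Char} (hc : c ∈ asciiLowerChars) (hc' : c' ∈ asciiLowerChars)
    (h : idxc c = idxc c') : c = c' := by
  rcases PySem.List.getElem_of_index?_eq_some (index?_eq_idxc hc) with ⟨hk, he, -⟩
  rcases PySem.List.getElem_of_index?_eq_some (index?_eq_idxc hc') with ⟨hk', he', -⟩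
  rw [← he, ← he']
  exact getElem_congr_idx h

lemma intBase2_shift (bs : List Char) (a : Int) :
    bs.foldl (fun a c => a * 2 + (if c = '1' then 1 else 0)) a
      = a * 2 ^ bs.length + intBase2 bs := by
  induction bs generalizing a with
  | nil => simp [intBase2]
  | cons c bs ih =>
    simp only [List.foldl_cons, List.length_cons, intBase2]
    rw [ih]; rw [ih]
    ring

lemma intBase2_set (bs : List Char) (i : Nat) (hi : i < bs.length) (h0 : bs[i] = '0') :
    intBase2 (bs.set i '1') = intBase2 bs + 2 ^ (bs.length - 1 - i) := by
  induction bs generalizing i with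
  | nil => simp at hi
  | cons c bs ih =>
    cases i with
    | zero =>
      simp only [List.getElem_cons_zero] at h0
      subst h0
      simp only [List.set_cons_zero, intBase2, List.foldl_cons]
      rw [intBase2_shift, intBase2_shift]
      simp [intBase2]
      ring
    | succ i =>
      simp only [List.getElem_cons_succ] at h0
      simp only [List.set_cons_succ, intBase2, List.foldl_cons]
      rw [intBase2_shift, intBase2_shift]
      rw [List.length_set, ih i (by simpa using hi) h0]
      have hexp : (c :: bs).length - 1 - (i + 1) = bs.length - 1 - i := by
        simp only [List.length_cons]
        omega
      rw [hexp]
      ring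

lemma intBase2_fold_set (is : List Nat) :
    ∀ (bs : List Char), is.Nodup → (∀ i ∈ is, ∃ h : i < bs.length, bs[i] = '0') →
    intBase2 (is.foldl (fun b i => b.set i '1') bs)
      = intBase2 bs + (is.map (fun i => (2 : Int) ^ (bs.length - 1 - i))).sum := by
  induction is with
  | nil => simp
  | cons i is ih =>
    intro bs hnd hcond
    rcases hcond i (by simp) with ⟨hi, h0⟩
    have hnd' := hnd.of_cons
    have hne : i ∉ is := (List.nodup_cons.mp hnd).1
    simp only [List.foldl_cons, List.map_cons, List.sum_cons]
    rw [ih (bs.set i '1') hnd' ?_]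
    · rw [intBase2_set bs i hi h0]
      simp only [List.length_set]
      ring
    · intro j hj
      rcases hcond j (by simp [hj]) with ⟨hjl, hj0⟩
      refine ⟨by simpa [List.length_set] using hjl, ?_⟩
      rw [List.getElem_set_ne (by rintro rfl; exact hne hj)]
      exact hj0

lemma mask_eq (w : String) (hw : ∀ c ∈ w.toList, 'a' ≤ c ∧ c ≤ 'z') :
    wordBitsA w = wordMaskB w := by
  have hmem : ∀ c ∈ PySem.Set.ofList w.toList, c ∈ asciiLowerChars := by
    intro c hc
    have hc' := (PySem.Set.mem_ofList w.toList c).mp hc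
    exact mem_ascii (hw c hc').1 (hw c hc').2
  have hnd : (PySem.Set.ofList w.toList).Nodup := PySem.Set.nodup_ofList _
  have hidx : ∀ i ∈ (PySem.Set.ofList w.toList).map idxc, i < 26 := by
    intro i hi
    rcases List.mem_map.mp hi with ⟨c, hc, rfl⟩
    exact idxc_lt (hmem c hc)
  -- A side
  have hA : wordBitsA w
      = ((PySem.Set.ofList w.toList).map (fun c => (2 : Int) ^ (25 - idxc c))).sum := by
    have hdef : wordBitsA w = intBase2 ((PySem.Set.ofList w.toList).foldl
        (fun (bs : List Char) c => match PySem.List.index? asciiLowerChars c with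
          | some i => bs.set i '1'
          | none => bs) (List.replicate 26 '0')) := rfl
    rw [hdef]
    rw [PySem.List.foldl_congr_mem _ _ (fun bs c => bs.set (idxc c) '1') _
      (by intro acc c hc; rw [index?_eq_idxc (hmem c hc)])]
    rw [← List.foldl_map (f := idxc) (g := fun (bs : List Char) i => bs.set i '1')]
    rw [intBase2_fold_set _ _ (List.Nodup.map_on (fun x hx y hy h => idxc_inj (hmem x hx) (hmem y hy) h) hnd) ?_]
    · have h0 : intBase2 (List.replicate 26 '0') = 0 := by decide
      rw [h0, List.map_map]
      simp only [List.length_replicate]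
      norm_num
      rfl
    · intro i hi
      refine ⟨by simpa using hidx i hi, ?_⟩
      apply List.getElem_replicate
  -- B side
  have hB : wordMaskB w
      = ((PySem.Set.ofList w.toList).map (fun c => (2 : Int) ^ (25 - idxc c))).sum := by
    unfold wordMaskB
    rw [(List.filterMap_eq_map_iff_forall_eq_some
      (f := fun c => (PySem.List.index? asciiLowerChars c).map
        (fun i : Nat => (1 : Int) <<< (25 - i)))
      (g := fun c => (1 : Int) <<< (25 - idxc c))
      (l := PySem.Set.ofList w.toList)).mpr
      (by intro c hc; rw [index?_eq_idxc (hmem c hc)]; rfl)]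
    have hshift : ∀ c, (1 : Int) <<< (25 - idxc c) = (2 : Int) ^ (25 - idxc c) := by
      intro c; rw [Int.shiftLeft_eq, one_mul]
    have hndb : ((PySem.Set.ofList w.toList).map (fun c => (1 : Int) <<< (25 - idxc c))).Nodup := by
      refine List.Nodup.map_on ?_ hnd
      intro x hx y hy h
      rw [hshift, hshift] at h
      have := Int.pow_right_injective (by norm_num) h
      have hx26 := idxc_lt (hmem x hx)
      have hy26 := idxc_lt (hmem y hy)
      exact idxc_inj (hmem x hx) (hmem y hy) (by omega)
    rw [PySem.Set.ofList_eq_self_of_nodup _ hndb]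
    rw [List.map_congr_left (fun c _ => hshift c)]
  rw [hA, hB]

theorem main_eq (dictionary : List String)
    (hpre : ∀ w ∈ dictionary, ∀ c ∈ w.toList, 'a' ≤ c ∧ c ≤ 'z') :
    preprocess_get_bit_to_word_dict_py dictionary
      = preprocess_get_bit_to_word_dict_py_alt dictionary := by
  -- rewrite A's loop body as Dict.modify
  have hfun : (fun (bd : PySem.Dict Int (List String)) word =>
      let wb := wordBitsA word
      match bd.get? wb with
      | some l => bd.insert wb (l ++ [word])
      | none   => bd.insert wb [word])
      = (fun (bd : PySem.Dict Int (List String)) word =>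
          bd.modify (wordBitsA word) [] (fun l => l ++ [word])) := by
    funext bd word
    simp only [PySem.Dict.modify, PySem.Dict.getD]
    cases h : bd.get? (wordBitsA word) <;> simp
  have hA : preprocess_get_bit_to_word_dict_py dictionary
      = (PySem.Set.ofList (dictionary.map wordBitsA)).map
          (fun k => (k, dictionary.filter (fun w => wordBitsA w == k))) := by
    unfold preprocess_get_bit_to_word_dict_py
    rw [hfun]
    have hkeys : ((dictionary.foldl (fun (bd : PySem.Dict Int (List String)) word =>
        bd.modify (wordBitsA word) [] (fun l => l ++ [word])) PySem.Dict.empty)).keys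
        = PySem.Set.ofList (dictionary.map wordBitsA) := by
      rw [PySem.Dict.keys_foldl_modify_key dictionary wordBitsA []
        (fun _ word => fun l => l ++ [word]) PySem.Dict.empty]
      rw [PySem.Set.ofList_eq_foldl]
      rfl
    have hnd : ((dictionary.foldl (fun (bd : PySem.Dict Int (List String)) word =>
        bd.modify (wordBitsA word) [] (fun l => l ++ [word])) PySem.Dict.empty)).keys.Nodup := by
      apply PySem.Dict.nodup_keys_foldl_modify_key
      simp [PySem.Dict.keys_empty]
    rw [PySem.Dict.items_eq_map_keys _ hnd [], hkeys]
    apply List.map_congr_left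
    intro k hk
    have hfold2 : (dictionary.foldl (fun (bd : PySem.Dict Int (List String)) word =>
        bd.modify (wordBitsA word) [] (fun l => l ++ [word])) PySem.Dict.empty)
        = ((dictionary.map (fun w => (wordBitsA w, w))).foldl
            (fun (bd : PySem.Dict Int (List String)) p =>
              bd.modify p.1 [] (fun l => l ++ [p.2])) PySem.Dict.empty) := by
      rw [List.foldl_map]
    rw [hfold2, PySem.Dict.getD_foldl_modify_append, PySem.Dict.getD_empty]
    simp only [List.nil_append, List.filter_map]
    rw [List.map_map]
    simp [Function.comp_def]
  have hB : preprocess_get_bit_to_word_dict_py_alt dictionary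
      = (PySem.Set.ofList (dictionary.map wordBitsA)).map
          (fun k => (k, dictionary.filter (fun w => wordBitsA w == k))) := by
    have hmasks : dictionary.map wordMaskB = dictionary.map wordBitsA :=
      List.map_congr_left (fun w hw => (mask_eq w (hpre w hw)).symm)
    have hdef : preprocess_get_bit_to_word_dict_py_alt dictionary
        = (PySem.List.dedup (dictionary.map wordMaskB)).map (fun m =>
            (m, ((dictionary.zip (dictionary.map wordMaskB)).filter
              (fun p => p.2 == m)).map (fun p => p.1))) := rfl
    rw [hdef, hmasks, PySem.List.dedup_eq_ofList]
    apply List.map_congr_left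
    intro k hk
    rw [← List.map_prod_left_eq_zip, List.filter_map, List.map_map]
    simp [Function.comp_def]
  rw [hA, hB]

-- ===== VERDICT (by name: the statement is the Claim_ definition above) =====
theorem preprocess_get_bit_to_word_dict_py_spec : Claim_equal_preprocess_get_bit_to_word_dict_py := by
  intro dictionary _ hpre
  unfold Spec_preprocess_get_bit_to_word_dict_py
  have hpre' : ∀ w ∈ dictionary, ∀ c ∈ w.toList, 'a' ≤ c ∧ c ≤ 'z' := by
    simp only [Pre_preprocess_get_bit_to_word_dict_py, List.all_eq_true,
      Bool.and_eq_true, decide_eq_true_eq] at hpre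
    exact hpre
  exact main_eq dictionary hpre'
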